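-- pv_equiv track=rewrite | github.com/ATGupta/FICSv1.0 | process.py | seperateLettersNumbersSymbols
-- ===== SOURCE A (Python) =====
-- def seperateLettersNumbersSymbols(st):
--     st2=""
--     prev=' '
--     for i in range(0, len(st)):
--         c=st[i]
--         if (ord(c)>=65 and ord(c)<=90)\
--             or (ord(c)>=97 and ord(c)<=122):
--             if (ord(prev) >= 65 and ord(prev) <= 90)\
--                 or (ord(prev) >= 97 and ord(prev) <= 122):
--                 st2=st2+c
--                 prev=c
--             else:
--                 st2=st2+" "+c
--                 prev=c
--
--         else:
--             if (ord(c)>=48 and ord(c)<=57):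
--                 if(ord(prev)>=48 and ord(prev)<=57):
--                     st2=st2+c
--                 else:
--                     st2=st2+" "+c
--                     prev=c
--
--             else:
--                 if c is ' ':
--                     st2 = st2 + c
--                     prev = c
--
--                 else:
--                     st2 = st2 + " " + c
--                     prev = c
--
--     return st2
-- ===== SOURCE B (Python) =====
-- def seperateLettersNumbersSymbols(st):
--     def cat(c):
--         o = ord(c)
--         if 65 <= o <= 90 or 97 <= o <= 122:
--             return 0
--         if 48 <= o <= 57:
--             return 1
--         if c == ' ':
--             return 2
--         return 3
--     # stage 1: split the string into maximal runs of equal category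
--     runs = []
--     cur = []
--     for c in st:
--         if cur and cat(cur[0]) == cat(c):
--             cur.append(c)
--         else:
--             if cur:
--                 runs.append(cur)
--             cur = [c]
--     if cur:
--         runs.append(cur)
--     # stage 2: render each run independently
--     out = []
--     for run in runs:
--         k = cat(run[0])
--         if k <= 1:
--             out.append(' ' + ''.join(run))
--         elif k == 2:
--             out.append(''.join(run))
--         else:
--             out.append(''.join(' ' + ch for ch in run))
--     return ''.join(out)
-- ===== Notes on version B (the rewrite author's own statement) =====
-- stated objective: alternative
-- what changed: Replaces A's single pass that compares each character with a tracked prev variable by two staged passes: first group the string into maximal runs of equal category (letter/digit/space/symbol), then render each run independently (letter/digit run gets one leading space, space run is copied verbatim, each symbol gets its own leading space).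
import Mathlib
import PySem

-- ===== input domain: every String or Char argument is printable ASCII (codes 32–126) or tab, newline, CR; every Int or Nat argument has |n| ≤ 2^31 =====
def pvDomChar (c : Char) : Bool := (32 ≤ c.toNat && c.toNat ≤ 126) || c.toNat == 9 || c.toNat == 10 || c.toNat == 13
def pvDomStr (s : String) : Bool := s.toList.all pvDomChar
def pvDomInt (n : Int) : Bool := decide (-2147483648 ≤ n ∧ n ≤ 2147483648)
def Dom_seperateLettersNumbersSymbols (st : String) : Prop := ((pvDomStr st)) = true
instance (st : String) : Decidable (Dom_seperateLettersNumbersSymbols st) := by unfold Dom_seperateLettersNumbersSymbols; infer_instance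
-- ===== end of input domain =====

-- B replaces A's single pass with a prev variable by two staged passes: group the
-- string into maximal runs of equal category, then render each run independently.

-- ===== PORT A =====
-- A: for-loop with accumulator st2 and prev, branches transliterated in order.
def pvStepA (s : List Char × Char) (c : Char) : List Char × Char :=
  let st2 := s.1
  let prev := s.2
  if (65 ≤ c.toNat ∧ c.toNat ≤ 90) ∨ (97 ≤ c.toNat ∧ c.toNat ≤ 122) then
    if (65 ≤ prev.toNat ∧ prev.toNat ≤ 90) ∨ (97 ≤ prev.toNat ∧ prev.toNat ≤ 122) then
      (st2 ++ [c], c)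
    else
      (st2 ++ [' ', c], c)
  else
    if 48 ≤ c.toNat ∧ c.toNat ≤ 57 then
      if 48 ≤ prev.toNat ∧ prev.toNat ≤ 57 then
        (st2 ++ [c], prev)   -- Python does not reassign prev in this branch
      else
        (st2 ++ [' ', c], c)
    else
      if c = ' ' then
        (st2 ++ [c], c)
      else
        (st2 ++ [' ', c], c)

def seperateLettersNumbersSymbols (st : String) : String :=
  String.mk (st.toList.foldl pvStepA ([], ' ')).1

-- ===== PORT B =====
-- Source B's cat: 0 letter, 1 digit, 2 space, 3 symbol.
def pvCat (c : Char) : Nat :=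
  if (65 ≤ c.toNat ∧ c.toNat ≤ 90) ∨ (97 ≤ c.toNat ∧ c.toNat ≤ 122) then 0
  else if 48 ≤ c.toNat ∧ c.toNat ≤ 57 then 1
  else if c = ' ' then 2
  else 3

-- stage-1 loop body: extend the current run or close it and start a new one.
def pvStepB (s : List (List Char) × List Char) (c : Char) : List (List Char) × List Char :=
  match s with
  | (rs, cur) =>
    match cur with
    | [] => (rs, [c])
    | c0 :: _ => if pvCat c0 = pvCat c then (rs, cur ++ [c]) else (rs ++ [cur], [c])

-- stage-2: render one run from its head's category.
def pvEmit (run : List Char) : List Char :=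
  match run with
  | [] => []
  | d :: _ =>
    if pvCat d ≤ 1 then ' ' :: run
    else if pvCat d = 2 then run
    else run.flatMap (fun ch => [' ', ch])

def seperateLettersNumbersSymbols_alt (st : String) : String :=
  let s := st.toList.foldl pvStepB ([], [])
  let runs := if s.2 = [] then s.1 else s.1 ++ [s.2]
  String.mk (runs.flatMap pvEmit)

-- ===== PRECONDITION & SPEC =====
def Spec_seperateLettersNumbersSymbols (st : String) (out : String) : Prop := out = seperateLettersNumbersSymbols_alt st
instance (st : String) (out : String) : Decidable (Spec_seperateLettersNumbersSymbols st out) := by unfold Spec_seperateLettersNumbersSymbols; infer_instance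

-- ===== CLAIM (what is proved, stated in full; the proofs are below) =====
def Claim_equal_seperateLettersNumbersSymbols : Prop := ∀ (st : String), Dom_seperateLettersNumbersSymbols st → Spec_seperateLettersNumbersSymbols st (seperateLettersNumbersSymbols st)

-- ===== LEMMAS AND PROOFS =====

-- Bridge: the chunk contributed by character c given predecessor p (pairwise view).
def pvPiece (p c : Char) : List Char :=
  if (65 ≤ c.toNat ∧ c.toNat ≤ 90) ∨ (97 ≤ c.toNat ∧ c.toNat ≤ 122) then
    if (65 ≤ p.toNat ∧ p.toNat ≤ 90) ∨ (97 ≤ p.toNat ∧ p.toNat ≤ 122) then [c] else [' ', c]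
  else if 48 ≤ c.toNat ∧ c.toNat ≤ 57 then
    if 48 ≤ p.toNat ∧ p.toNat ≤ 57 then [c] else [' ', c]
  else if c = ' ' then [c] else [' ', c]

def pvZF (p : Char) : List Char → List Char
  | [] => []
  | c :: r => pvPiece p c ++ pvZF c r

-- pvPiece depends on its first argument only through its category.
theorem pvPiece_congr (p q c : Char) (h : pvCat p = pvCat q) :
    pvPiece p c = pvPiece q c := by
  unfold pvCat at h
  unfold pvPiece
  split_ifs at h ⊢ <;> first | rfl | omega

theorem pvZF_congr (p q : Char) (l : List Char) (h : pvCat p = pvCat q) :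
    pvZF p l = pvZF q l := by
  cases l with
  | nil => rfl
  | cons c r => simp [pvZF, pvPiece_congr p q c h]

-- a predecessor of a different category behaves like the initial ' '.
theorem pvPiece_first (p c : Char) (h : pvCat p ≠ pvCat c) :
    pvPiece p c = pvPiece ' ' c := by
  unfold pvCat at h
  unfold pvPiece
  split_ifs at h ⊢ <;> simp_all <;> omega

-- a same-category predecessor: continuation chunk.
theorem pvPiece_same (p c : Char) (h : pvCat p = pvCat c) :
    pvPiece p c = if pvCat c ≤ 2 then [c] else [' ', c] := by
  unfold pvCat at h ⊢
  unfold pvPiece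
  split_ifs at h ⊢ <;> simp_all

-- A's step writes exactly the pairwise chunk; prev kept only in the digit-continuation case.
theorem pvStepA_eq (st2 : List Char) (prev c : Char) :
    pvStepA (st2, prev) c =
      (st2 ++ pvPiece prev c,
       if (¬((65 ≤ c.toNat ∧ c.toNat ≤ 90) ∨ (97 ≤ c.toNat ∧ c.toNat ≤ 122))) ∧
          (48 ≤ c.toNat ∧ c.toNat ≤ 57) ∧ (48 ≤ prev.toNat ∧ prev.toNat ≤ 57)
       then prev else c) := by
  unfold pvStepA pvPiece
  dsimp only
  split_ifs <;> first | rfl | tauto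


theorem pvCat_digit (p c : Char) (hc : 48 ≤ c.toNat ∧ c.toNat ≤ 57)
    (hp : 48 ≤ p.toNat ∧ p.toNat ≤ 57) : pvCat p = pvCat c := by
  unfold pvCat; split_ifs <;> first | rfl | omega

-- Loop invariant for A: the fold from (acc, prev) produces acc ++ pairwise chunks.
theorem pv_mainA (l : List Char) : ∀ (acc : List Char) (prev : Char),
    (l.foldl pvStepA (acc, prev)).1 = acc ++ pvZF prev l := by
  induction l with
  | nil => intro acc prev; simp [pvZF]
  | cons c r ih =>
    intro acc prev
    rw [List.foldl_cons, pvStepA_eq]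
    show _ = acc ++ (pvPiece prev c ++ pvZF c r)
    by_cases hP : (¬((65 ≤ c.toNat ∧ c.toNat ≤ 90) ∨ (97 ≤ c.toNat ∧ c.toNat ≤ 122))) ∧
        (48 ≤ c.toNat ∧ c.toNat ≤ 57) ∧ (48 ≤ prev.toNat ∧ prev.toNat ≤ 57)
    · rw [if_pos hP, ih, List.append_assoc,
        pvZF_congr prev c r (pvCat_digit prev c hP.2.1 hP.2.2)]
    · rw [if_neg hP, ih, List.append_assoc]

-- B-side. Uniform runs: every element has the head's category.
theorem pvZF_uniform (w : List Char) : ∀ (p : Char), (∀ x ∈ w, pvCat x = pvCat p) →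
    pvZF p w = if pvCat p ≤ 2 then w else w.flatMap (fun x => [' ', x]) := by
  induction w with
  | nil => intro p _; simp [pvZF]
  | cons x w' ih =>
    intro p hu
    have hx : pvCat x = pvCat p := hu x (by simp)
    have hw' : ∀ y ∈ w', pvCat y = pvCat x := by
      intro y hy; rw [hx]; exact hu y (by simp [hy])
    rw [pvZF, pvPiece_same p x hx.symm, ih x hw', hx]
    split_ifs <;> simp

-- rendering a uniform nonempty run equals the pairwise chunks seeded with ' '.
theorem pvEmit_uniform (c0 : Char) (w : List Char) (hu : ∀ x ∈ w, pvCat x = pvCat c0) :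
    pvEmit (c0 :: w) = pvZF ' ' (c0 :: w) := by
  have h1 : pvPiece ' ' c0 = if pvCat c0 = 2 then [c0] else [' ', c0] := by
    unfold pvCat
    unfold pvPiece
    split_ifs <;> first | rfl | omega | simp_all
  rw [pvZF, pvZF_uniform w c0 hu, h1,
    show pvEmit (c0 :: w) = (if pvCat c0 ≤ 1 then ' ' :: c0 :: w
      else if pvCat c0 = 2 then c0 :: w
      else (c0 :: w).flatMap (fun ch => [' ', ch])) from rfl]
  by_cases ha : pvCat c0 ≤ 1
  · have hb : ¬ pvCat c0 = 2 := by omega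
    have hc : pvCat c0 ≤ 2 := by omega
    simp [ha, hb, hc]
  · by_cases hb : pvCat c0 = 2
    · simp [hb]
    · have hc : ¬ pvCat c0 ≤ 2 := by omega
      simp [ha, hb, hc]

-- snoc on a uniform run appends one continuation chunk.
theorem pvZF_snoc (w : List Char) : ∀ (p c0 c : Char), (∀ x ∈ w, pvCat x = pvCat c0) →
    pvZF p (c0 :: w ++ [c]) = pvZF p (c0 :: w) ++ pvPiece c0 c := by
  induction w with
  | nil => intro p c0 c _; simp [pvZF]
  | cons x w' ih =>
    intro p c0 c hu
    have hx : pvCat x = pvCat c0 := hu x (by simp)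
    have hw' : ∀ y ∈ w', pvCat y = pvCat x := by
      intro y hy; rw [hx]; exact hu y (by simp [hy])
    have := ih c0 x c hw'
    simp only [pvZF, List.cons_append] at this ⊢
    rw [this, pvPiece_congr x c0 c hx]
    simp [List.append_assoc]

-- stage-1 invariant: rendering the final runs = chunks so far ++ pairwise chunks of the rest.
theorem pv_mainB (l : List Char) : ∀ (rs : List (List Char)) (c0 : Char) (w : List Char),
    (∀ x ∈ w, pvCat x = pvCat c0) →
    (let s := l.foldl pvStepB (rs, c0 :: w)
     ((if s.2 = [] then s.1 else s.1 ++ [s.2]).flatMap pvEmit)) =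
    rs.flatMap pvEmit ++ pvZF ' ' (c0 :: w) ++ pvZF c0 l := by
  induction l with
  | nil =>
    intro rs c0 w hu
    simp [pvZF, pvEmit_uniform c0 w hu]
  | cons c t ih =>
    intro rs c0 w hu
    simp only [List.foldl_cons]
    by_cases h : pvCat c0 = pvCat c
    · rw [show pvStepB (rs, c0 :: w) c = (rs, c0 :: (w ++ [c])) by
        simp [pvStepB, if_pos h]]
      have hu' : ∀ x ∈ w ++ [c], pvCat x = pvCat c0 := by
        intro x hx
        rcases List.mem_append.1 hx with h1 | h1
        · exact hu x h1
        · simp at h1; subst h1; omega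
      rw [ih rs c0 (w ++ [c]) hu']
      have : pvZF ' ' (c0 :: (w ++ [c])) = pvZF ' ' (c0 :: w) ++ pvPiece c0 c :=
        pvZF_snoc w ' ' c0 c hu
      rw [this, pvZF_congr c0 c t h]
      show _ = _ ++ (pvPiece c0 c ++ pvZF c t)
      simp [List.append_assoc]
    · rw [show pvStepB (rs, c0 :: w) c = (rs ++ [c0 :: w], [c]) by
        simp [pvStepB, if_neg h]]
      rw [ih (rs ++ [c0 :: w]) c [] (by simp)]
      rw [List.flatMap_append]
      have h1 : pvZF ' ' [c] = pvPiece ' ' c := by simp [pvZF]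
      have h2 : pvPiece ' ' c = pvPiece c0 c := (pvPiece_first c0 c h).symm
      rw [h1, h2]
      simp only [List.flatMap_cons, List.flatMap_nil, List.append_nil,
        pvEmit_uniform c0 w hu]
      show _ = _ ++ (pvPiece c0 c ++ pvZF c t)
      simp [List.append_assoc]

-- ===== VERDICT (by name: the statement is the Claim_ definition above) =====
theorem seperateLettersNumbersSymbols_spec : Claim_equal_seperateLettersNumbersSymbols := by
  intro st _
  show _ = _
  unfold seperateLettersNumbersSymbols seperateLettersNumbersSymbols_alt
  rw [pv_mainA st.toList [] ' ']
  cases hl : st.toList with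
  | nil => rfl
  | cons c t =>
    simp only [List.foldl_cons]
    rw [show pvStepB (([] : List (List Char)), ([] : List Char)) c = ([], [c]) from rfl]
    have := pv_mainB t [] c [] (by simp)
    simp only [List.flatMap_nil, List.nil_append] at this
    rw [this]
    have : pvZF ' ' (c :: t) = pvZF ' ' [c] ++ pvZF c t := by simp [pvZF]
    rw [this]
    simp [pvZF]
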